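-- pv_equiv track=rewrite | github.com/arifcalik/kattis | Text Encryption.py | create_indices
-- ===== SOURCE A (Python) =====
-- def create_indices(width, length):
--     indices = []
--     j = 0
--     while len(indices) < length:
--         indices.append(j)
--         j += width
--         if j >= length:
--             j = j%width + 1
--     return indices
-- ===== SOURCE B (Python) =====
-- def create_indices(width, length):
--     indices = []
--     for c in range(min(width, max(length, 0))):
--         indices.extend(range(c, length, width))
--     return indices
-- ===== Notes on version B (the rewrite author's own statement) =====
-- stated objective: simpler
-- what changed: Replaces the stateful single while-loop (running index with modular wrap-around j = j%width+1 and a length-counted exit) by a direct nested traversal: concatenate the arithmetic ranges range(c, length, width) for each non-empty column c in range(min(width, max(length, 0))).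
-- outside the precondition, e.g. on create_indices(-2, 3): A returns [0, -2, -4], B returns []; on create_indices(0, 2): A returns [0, 0], B returns []
import Mathlib
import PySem

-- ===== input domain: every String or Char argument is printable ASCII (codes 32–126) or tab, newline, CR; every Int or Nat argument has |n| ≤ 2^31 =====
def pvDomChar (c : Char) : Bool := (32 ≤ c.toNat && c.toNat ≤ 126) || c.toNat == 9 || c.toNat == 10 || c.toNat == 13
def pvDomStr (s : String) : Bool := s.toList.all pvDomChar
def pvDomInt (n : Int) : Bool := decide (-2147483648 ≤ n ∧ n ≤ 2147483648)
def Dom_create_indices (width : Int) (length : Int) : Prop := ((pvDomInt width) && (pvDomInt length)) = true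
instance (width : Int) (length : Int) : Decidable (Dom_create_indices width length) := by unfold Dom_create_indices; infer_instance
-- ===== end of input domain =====

-- B replaces A's stateful while-loop with modular wrap by concatenating the per-column
-- arithmetic ranges range(c, length, width) for c in range(width)  (objective: simpler).

-- ===== PORT A =====
-- the while loop runs exactly (length - len(indices)) more iterations, one append per
-- iteration, so fuel length.toNat from the empty accumulator is exact wherever A returns
def createIndicesGo (width length : Int) : Nat → Int → List Int → List Int
  | 0, _, indices => indices
  | Nat.succ n, j, indices =>
      let indices' := indices ++ [j]
      let j' := j + width
      if length ≤ j' then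
        createIndicesGo width length n (PySem.Int.mod j' width + 1) indices'
      else
        createIndicesGo width length n j' indices'

def create_indices (width : Int) (length : Int) : List Int :=
  createIndicesGo width length length.toNat 0 []

-- ===== PORT B =====
def create_indices_alt (width : Int) (length : Int) : List Int :=
  (PySem.List.pyRange 0 (min width (max length 0)) 1).flatMap
    (fun c => PySem.List.pyRange c length width)

-- ===== PRECONDITION & SPEC =====
-- Pre_ excludes width ≤ 0 with length > 0, outside the cipher's natural domain of a
-- positive column width: there A returns a meaningless list (length copies of 0 for
-- width = 0, a descending negative list for width < 0), while B naturally returns [].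
def Pre_create_indices (width : Int) (length : Int) : Prop := 1 ≤ width ∨ length ≤ 0
instance (width : Int) (length : Int) : Decidable (Pre_create_indices width length) := by
  unfold Pre_create_indices; infer_instance

def pvWitness_create_indices : Int × Int := (3, 7)

def Spec_create_indices (width : Int) (length : Int) (out : List Int) : Prop := out = create_indices_alt width length
instance (width : Int) (length : Int) (out : List Int) : Decidable (Spec_create_indices width length out) := by unfold Spec_create_indices; infer_instance

-- ===== CLAIM (what is proved, stated in full; the proofs are below) =====
def Claim_equal_create_indices : Prop := ∀ (width : Int) (length : Int), Dom_create_indices width length → Pre_create_indices width length → Spec_create_indices width length (create_indices width length)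

-- ===== LEMMAS AND PROOFS =====

-- pyRange with positive step: nil and cons unfolding
theorem pyRange_pos_eq_nil (a b s : Int) (hs : 0 < s) (h : b ≤ a) :
    PySem.List.pyRange a b s = [] := by
  rw [PySem.List.pyRange_of_pos a b hs]
  simp [show ¬ a < b by omega]

theorem pyRange_pos_cons (a b s : Int) (hs : 0 < s) (h : a < b) :
    PySem.List.pyRange a b s = a :: PySem.List.pyRange (a + s) b s := by
  rw [PySem.List.pyRange_of_pos a b hs, PySem.List.pyRange_of_pos (a + s) b hs]
  have hcount : (if a < b then ((b - a + s - 1) / s).toNat else 0)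
      = (if a + s < b then ((b - (a + s) + s - 1) / s).toNat else 0) + 1 := by
    rw [if_pos h]
    by_cases h2 : a + s < b
    · rw [if_pos h2]
      have he : b - a + s - 1 = (b - a - 1) + 1 * s := by ring
      have : (b - a + s - 1) / s = (b - a - 1) / s + 1 := by
        rw [he, Int.add_mul_ediv_right _ _ (by omega : s ≠ 0)]
      rw [this]
      have h3 : b - (a + s) + s - 1 = b - a - 1 := by ring
      rw [h3]
      have hnn : 0 ≤ (b - a - 1) / s := Int.ediv_nonneg (by omega) (by omega)
      omega
    · rw [if_neg h2]
      have h1 : (1 : Int) ≤ (b - a + s - 1) / s := by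
        rw [Int.le_ediv_iff_mul_le hs]; omega
      have h2' : (b - a + s - 1) / s < 2 := by
        rw [Int.ediv_lt_iff_lt_mul hs]; omega
      omega
  rw [hcount, List.range_succ_eq_map, List.map_cons, List.map_map]
  refine congrArg₂ _ (by simp) ?_
  apply List.map_congr_left
  intro k _
  simp [Nat.succ_eq_add_one]
  ring

theorem emod_le_self_int (a w : Int) (ha : 0 ≤ a) (hw : 0 < w) : a % w ≤ a := by
  have h1 : 0 ≤ a / w := Int.ediv_nonneg ha (le_of_lt hw)
  have h2 : w * (a / w) + a % w = a := Int.mul_ediv_add_emod a w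
  nlinarith [mul_nonneg (le_of_lt hw) h1]

-- appending one more target index: range(c, L+1, w) adds L exactly when L ≡ c (mod w) and c ≤ L
theorem pyRange_succ_right_gen (w : Int) (hw : 0 < w) (c L : Int) (hc : 0 ≤ c) (hL : 0 ≤ L) :
    PySem.List.pyRange c (L + 1) w
      = PySem.List.pyRange c L w ++ (if L % w = c % w ∧ c ≤ L then [L] else []) := by
  by_cases hcle : c ≤ L
  · have hlt : c < L + 1 := by omega
    rw [pyRange_pos_cons c (L + 1) w hw hlt]
    by_cases hceq : c = L
    · subst hceq
      rw [pyRange_pos_eq_nil (c + w) (c + 1) w hw (by omega),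
          pyRange_pos_eq_nil c c w hw le_rfl]
      simp
    · have hclt : c < L := by omega
      have hmod : (c + w) % w = c % w := by
        simp
      rw [pyRange_succ_right_gen w hw (c + w) L (by omega) hL,
          pyRange_pos_cons c L w hw hclt]
      by_cases hm : L % w = c % w
      · have hdvd : w ∣ L - c := by
          have h0 : (L - c) % w = 0 := by
            rw [Int.sub_emod, hm]; simp
          exact Int.dvd_of_emod_eq_zero h0
        have hle : w ≤ L - c := Int.le_of_dvd (by omega) hdvd
        simp [hm, hmod, hcle, show c + w ≤ L by omega]
      · simp [hm, hmod]
  · rw [pyRange_pos_eq_nil c (L + 1) w hw (by omega),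
        pyRange_pos_eq_nil c L w hw (by omega)]
    simp [hcle]
termination_by (L + 1 - c).toNat
decreasing_by omega

theorem sum_map_add_nat (l : List Int) (f g : Int → Nat) :
    (l.map (fun x => f x + g x)).sum = (l.map f).sum + (l.map g).sum := by
  induction l with
  | nil => simp
  | cons a t ih => simp [ih]; omega

theorem sum_map_ite_zero (x : Int) (l : List Int) (hx : x ∉ l) :
    (l.map (fun c => if x = c then (1 : Nat) else 0)).sum = 0 := by
  induction l with
  | nil => simp
  | cons a t ih =>
      simp only [List.mem_cons, not_or] at hx
      simp [hx.1, ih hx.2]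

theorem sum_map_ite_eq_one (x : Int) : ∀ (l : List Int), l.Nodup → x ∈ l →
    (l.map (fun c => if x = c then (1 : Nat) else 0)).sum = 1 := by
  intro l
  induction l with
  | nil => simp
  | cons a t ih =>
      intro hnd hmem
      obtain ⟨hna, hnt⟩ := List.nodup_cons.mp hnd
      rcases List.mem_cons.mp hmem with h | h
      · subst h
        simp [sum_map_ite_zero x t hna]
      · have hxa : x ≠ a := by rintro rfl; exact hna h
        simp [hxa, ih hnt h]

-- total number of indices produced by all columns is exactly n
theorem sum_cols_length (w : Int) (hw : 0 < w) :
    ∀ n : Nat,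
      ((PySem.List.pyRange 0 w 1).map (fun c => (PySem.List.pyRange c (n : Int) w).length)).sum = n := by
  intro n
  induction n with
  | zero =>
      simp only [Nat.cast_zero]
      rw [List.map_congr_left (g := fun _ => 0) ?_]
      · simp
      · intro c hc
        have h0 : 0 ≤ c := (PySem.List.mem_pyRange_one.mp hc).1
        rw [pyRange_pos_eq_nil c 0 w hw h0]
        rfl
  | succ n ih =>
      have hcast : ((n + 1 : Nat) : Int) = (n : Int) + 1 := by push_cast; ring
      rw [hcast]
      have hcols : ∀ c ∈ PySem.List.pyRange 0 w 1,
          (PySem.List.pyRange c ((n : Int) + 1) w).length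
            = (PySem.List.pyRange c (n : Int) w).length
              + (if (n : Int) % w = c then 1 else 0) := by
        intro c hc
        obtain ⟨h0, h1⟩ := PySem.List.mem_pyRange_one.mp hc
        rw [pyRange_succ_right_gen w hw c n h0 (Int.natCast_nonneg n)]
        have hcm : c % w = c := Int.emod_eq_of_lt h0 h1
        rw [hcm]
        by_cases hm : (n : Int) % w = c
        · have hcn : c ≤ (n : Int) := by
            have := emod_le_self_int (n : Int) w (Int.natCast_nonneg n) hw
            omega
          simp [hm, hcn]
        · simp [hm]
      rw [List.map_congr_left hcols, sum_map_add_nat, ih,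
          sum_map_ite_eq_one ((n : Int) % w) _ (PySem.List.nodup_pyRange_one 0 w) ?_]
      have hmem : 0 ≤ (n : Int) % w ∧ (n : Int) % w < w :=
        ⟨Int.emod_nonneg _ (by omega), Int.emod_lt_of_pos _ hw⟩
      exact PySem.List.mem_pyRange_one.mpr ⟨hmem.1, hmem.2⟩

-- running A's loop through one full column
theorem createIndicesGo_col (width length : Int) (hw : 0 < width) (j : Int) (m : Nat)
    (acc : List Int) (h0 : 0 ≤ j) (h1 : j < length) :
    createIndicesGo width length ((PySem.List.pyRange j length width).length + m) j acc
      = createIndicesGo width length m (j % width + 1) (acc ++ PySem.List.pyRange j length width) := by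
  rw [pyRange_pos_cons j length width hw h1]
  by_cases h2 : length ≤ j + width
  · rw [pyRange_pos_eq_nil (j + width) length width hw h2]
    have hmod : PySem.Int.mod (j + width) width = j % width := by
      rw [PySem.Int.mod_eq_emod_of_pos hw]
      simp
    simp only [List.length_cons, List.length_nil]
    rw [show (0 : Nat) + 1 + m = Nat.succ m by omega]
    simp [createIndicesGo, h2, hmod]
  · have hrec := createIndicesGo_col width length hw (j + width) m (acc ++ [j])
      (by omega) (by omega)
    have hmod : (j + width) % width = j % width := by
      simp
    simp only [List.length_cons]
    rw [show (PySem.List.pyRange (j + width) length width).length + 1 + m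
        = Nat.succ ((PySem.List.pyRange (j + width) length width).length + m) by omega]
    have hstep : createIndicesGo width length
        (Nat.succ ((PySem.List.pyRange (j + width) length width).length + m)) j acc
        = createIndicesGo width length
            ((PySem.List.pyRange (j + width) length width).length + m) (j + width) (acc ++ [j]) := by
      simp [createIndicesGo, show ¬ length ≤ j + width from h2]
    rw [hstep, hrec, hmod]
    simp
termination_by (length - j).toNat
decreasing_by omega

theorem flatMap_empty_of_le (width length : Int) (hw : 0 < width) :
    ∀ (c : Int), length ≤ c →
      (PySem.List.pyRange c width 1).flatMap (fun c' => PySem.List.pyRange c' length width) = [] := by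
  intro c hc
  by_cases h : c < width
  · rw [PySem.List.pyRange_one_cons h, List.flatMap_cons,
        pyRange_pos_eq_nil c length width hw hc,
        flatMap_empty_of_le width length hw (c + 1) (by omega)]
    rfl
  · rw [PySem.List.pyRange_one_eq_nil (by omega)]
    rfl
termination_by c => (width - c).toNat
decreasing_by omega

-- every column starting from c, with exact fuel
theorem createIndicesGo_cols (width length : Int) (hw : 0 < width) :
    ∀ (c : Int) (acc : List Int), 0 ≤ c → c ≤ width →
      createIndicesGo width length
          (((PySem.List.pyRange c width 1).flatMap (fun c' => PySem.List.pyRange c' length width)).length)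
          c acc
        = acc ++ (PySem.List.pyRange c width 1).flatMap (fun c' => PySem.List.pyRange c' length width) := by
  intro c acc hc0 hcw
  by_cases h : c < width
  · by_cases hcl : c < length
    · rw [PySem.List.pyRange_one_cons h, List.flatMap_cons, List.length_append,
          createIndicesGo_col width length hw c _ acc hc0 hcl]
      have hcm : c % width = c := Int.emod_eq_of_lt hc0 h
      rw [hcm, createIndicesGo_cols width length hw (c + 1) _ (by omega) (by omega)]
      simp
    · have he : (PySem.List.pyRange c width 1).flatMap
          (fun c' => PySem.List.pyRange c' length width) = [] :=
        flatMap_empty_of_le width length hw c (by omega)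
      rw [he]
      simp [createIndicesGo]
  · rw [PySem.List.pyRange_one_eq_nil (by omega)]
    simp [createIndicesGo]
termination_by c _ => (width - c).toNat
decreasing_by omega

-- B's bound min(width, max(length,0)) skips only empty columns
theorem alt_bound_eq (width length : Int) (hw : 0 < width) (hl : 0 < length) :
    (PySem.List.pyRange 0 (min width (max length 0)) 1).flatMap
        (fun c => PySem.List.pyRange c length width)
      = (PySem.List.pyRange 0 width 1).flatMap
        (fun c => PySem.List.pyRange c length width) := by
  have hmax : max length 0 = length := max_eq_left (by omega)
  rw [hmax]
  by_cases h : length < width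
  · have hmin : min width length = length := min_eq_right (by omega)
    rw [hmin, PySem.List.pyRange_one_append 0 length width (by omega) (by omega),
        List.flatMap_append, flatMap_empty_of_le width length hw length le_rfl,
        List.append_nil]
  · rw [min_eq_left (by omega)]

-- ===== VERDICT (by name: the statement is the Claim_ definition above) =====
theorem create_indices_spec : Claim_equal_create_indices := by
  intro width length _ hpre
  unfold Spec_create_indices create_indices create_indices_alt
  by_cases hl : length ≤ 0
  · have hz : length.toNat = 0 := by omega
    have hmax : max length 0 = 0 := max_eq_right hl
    rw [hz, hmax]
    by_cases hwpos : 0 < width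
    · rw [min_eq_right (by omega), PySem.List.pyRange_one_eq_nil le_rfl]
      rfl
    · rw [min_eq_left (by omega), PySem.List.pyRange_one_eq_nil (by omega)]
      rfl
  · have hw : 0 < width := by rcases hpre with h | h; omega; omega
    rw [alt_bound_eq width length hw (by omega)]
    have hcast : ((length.toNat : Nat) : Int) = length := Int.toNat_of_nonneg (by omega)
    have hlen : ((PySem.List.pyRange 0 width 1).flatMap
        (fun c' => PySem.List.pyRange c' length width)).length = length.toNat := by
      rw [List.length_flatMap]
      have := sum_cols_length width hw length.toNat
      rw [hcast] at this
      simpa using this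
    rw [← hlen, createIndicesGo_cols width length hw 0 [] le_rfl (by omega)]
    rfl
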